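-- pv_equiv track=rewrite | github.com/patrick1011/py_algorithms | search/bfs_htable.py | bfs
-- ===== SOURCE A (Python) =====
-- def bfs(adj, s):
--     level = {s: 0}
--     parent = {s: None}
--     frontier = [s]
--     while frontier:
--         _next = []
--         for u in frontier:
--             for v in adj[u]:
--                 if v not in level:
--                     level[v] = level[u] + 1
--                     parent[v] = u
--                     _next.append(v)
--             frontier = _next
--     return level
-- ===== SOURCE B (Python) =====
-- def bfs(adj, s):
--     level = {s: 0}
--     queue = [s]
--     i = 0
--     while i < len(queue):
--         u = queue[i]
--         i += 1
--         for v in adj[u]: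
--             if v not in level:
--                 level[v] = level[u] + 1
--                 queue.append(v)
--     return level
-- ===== Notes on version B (the rewrite author's own statement) =====
-- stated objective: simpler
-- what changed: Replaces the level-synchronous double loop (a frontier list rebuilt into _next each round, plus a parent dict that is computed but never returned) by the standard single FIFO-queue BFS with a read cursor over one growing list; discovery order, and hence the returned dict's insertion order, is identical.
import Mathlib
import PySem

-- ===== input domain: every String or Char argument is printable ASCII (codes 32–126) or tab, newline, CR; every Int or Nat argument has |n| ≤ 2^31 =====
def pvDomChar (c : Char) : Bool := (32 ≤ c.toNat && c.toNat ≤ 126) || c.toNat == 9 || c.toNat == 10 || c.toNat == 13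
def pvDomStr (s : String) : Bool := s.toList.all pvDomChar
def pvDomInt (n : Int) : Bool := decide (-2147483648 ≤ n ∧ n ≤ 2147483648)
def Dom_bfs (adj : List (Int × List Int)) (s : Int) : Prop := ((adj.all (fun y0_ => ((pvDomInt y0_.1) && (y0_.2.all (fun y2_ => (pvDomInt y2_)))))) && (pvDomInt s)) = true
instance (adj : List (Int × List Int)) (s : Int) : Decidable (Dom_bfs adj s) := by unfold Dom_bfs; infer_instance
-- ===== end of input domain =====

-- B replaces A's level-synchronous frontier/_next double loop (and the unreturned parent dict)
-- by the standard single FIFO-queue BFS; same return value and same dict insertion order.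

-- ===== PORT A =====
-- Shared measure machinery (needed by both loops' termination proofs):
-- pvU adj = every vertex mentioned in adj; pvUnv counts its occurrences not yet in `level`.
def pvU (adj : List (Int × List Int)) : List Int := adj.map Prod.fst ++ adj.flatMap Prod.snd

def pvUnv (adj : List (Int × List Int)) (level : PySem.Dict Int Int) : Nat :=
  (pvU adj).countP (fun v => !(level.contains v))

-- every neighbour list the ports can read is made of vertices of pvU adj
lemma pvMem_getD_adj (adj : List (Int × List Int)) (u v : Int)
    (h : v ∈ (PySem.Dict.mk adj).getD u []) : v ∈ pvU adj := by
  have hfm : v ∈ adj.flatMap Prod.snd := by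
    induction adj with
    | nil => simp [PySem.Dict.getD, PySem.Dict.get?] at h
    | cons p rest ih =>
        by_cases hk : p.1 == u
        · have he : (PySem.Dict.mk (p :: rest)).getD u [] = p.2 := by
            simp [PySem.Dict.getD, PySem.Dict.get?, hk]
          rw [he] at h
          exact List.mem_flatMap.mpr ⟨p, List.mem_cons_self, h⟩
        · have he : (PySem.Dict.mk (p :: rest)).getD u [] = (PySem.Dict.mk rest).getD u [] := by
            simp [PySem.Dict.getD, PySem.Dict.get?, hk]
          rw [he] at h
          have := ih h
          rw [List.flatMap_cons]
          exact List.mem_append_right _ this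
  exact List.mem_append_right _ hfm

-- inserting a fresh vertex of U strictly shrinks the count of not-yet-visited occurrences
lemma pvCountP_insert_fresh (U : List Int) (l : PySem.Dict Int Int) (v x : Int)
    (hv : v ∈ U) (hf : l.contains v = false) :
    U.countP (fun w => !((l.insert v x).contains w)) + 1 ≤ U.countP (fun w => !(l.contains w)) := by
  induction U with
  | nil => cases hv
  | cons w ws ih =>
      have hmono : ws.countP (fun y => !((l.insert v x).contains y)) ≤
          ws.countP (fun y => !(l.contains y)) := by
        apply List.countP_mono_left
        intro a _ ha
        simp only [PySem.Dict.contains_insert, Bool.not_eq_true', Bool.or_eq_false_iff] at ha ⊢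
        exact ha.2
      have hhead : (if (!((l.insert v x).contains w)) = true then 1 else 0) ≤
          (if (!(l.contains w)) = true then (1:Nat) else 0) := by
        simp only [PySem.Dict.contains_insert]
        by_cases h : l.contains w
        · simp [h]
        · simp [h]
          split <;> simp
      simp only [List.countP_cons]
      rcases List.mem_cons.mp hv with rfl | hv'
      · have h1 : (!((l.insert v x).contains v)) = false := by simp
        have h2 : (!(l.contains v)) = true := by simp [hf]
        rw [h1, h2]
        simp
        omega
      · have := ih hv'
        omega

lemma pvUnv_insert_fresh (adj : List (Int × List Int)) (l : PySem.Dict Int Int)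
    (v : Int) (x : Int) (hv : v ∈ pvU adj) (hf : l.contains v = false) :
    pvUnv adj (l.insert v x) + 1 ≤ pvUnv adj l :=
  pvCountP_insert_fresh (pvU adj) l v x hv hf

-- A's per-neighbour step: state = (level, parent, _next)
def pvStepA (u : Int) (st : PySem.Dict Int Int × PySem.Dict Int (Option Int) × List Int)
    (v : Int) : PySem.Dict Int Int × PySem.Dict Int (Option Int) × List Int :=
  if st.1.contains v then st
  else (st.1.insert v (st.1.getD u 0 + 1), st.2.1.insert v (some u), st.2.2 ++ [v])

-- A's inner loop: for v in adj[u]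
def pvInnerA (adj : List (Int × List Int))
    (st : PySem.Dict Int Int × PySem.Dict Int (Option Int) × List Int) (u : Int) :
    PySem.Dict Int Int × PySem.Dict Int (Option Int) × List Int :=
  ((PySem.Dict.mk adj).getD u []).foldl (pvStepA u) st

-- A's outer 'for u in frontier' loop of one round
def pvBatchA (adj : List (Int × List Int))
    (st : PySem.Dict Int Int × PySem.Dict Int (Option Int) × List Int)
    (frontier : List Int) : PySem.Dict Int Int × PySem.Dict Int (Option Int) × List Int :=
  frontier.foldl (pvInnerA adj) st

lemma pvInnerA_bound (adj : List (Int × List Int)) (u : Int) :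
    ∀ (ns : List Int) (l : PySem.Dict Int Int) (p : PySem.Dict Int (Option Int)) (a : List Int),
      (∀ v ∈ ns, v ∈ pvU adj) →
      pvUnv adj (ns.foldl (pvStepA u) (l, p, a)).1 + (ns.foldl (pvStepA u) (l, p, a)).2.2.length ≤
        pvUnv adj l + a.length := by
  intro ns
  induction ns with
  | nil => intro l p a _; simp
  | cons v ns ih =>
      intro l p a hmem
      simp only [List.foldl_cons]
      by_cases hc : l.contains v
      · simp only [pvStepA, hc, if_pos]
        exact ih l p a (fun w hw => hmem w (List.mem_cons_of_mem _ hw))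
      · have hfresh := pvUnv_insert_fresh adj l v (l.getD u 0 + 1)
          (hmem v List.mem_cons_self) (by simpa using hc)
        simp only [pvStepA, hc, if_neg, Bool.false_eq_true, not_false_iff]
        have := ih (l.insert v (l.getD u 0 + 1)) (p.insert v (some u)) (a ++ [v])
          (fun w hw => hmem w (List.mem_cons_of_mem _ hw))
        simp only [List.length_append, List.length_cons, List.length_nil] at this
        omega

lemma pvBatchA_bound (adj : List (Int × List Int)) :
    ∀ (fr : List Int) (l : PySem.Dict Int Int) (p : PySem.Dict Int (Option Int)) (a : List Int),
      pvUnv adj (pvBatchA adj (l, p, a) fr).1 + (pvBatchA adj (l, p, a) fr).2.2.length ≤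
        pvUnv adj l + a.length := by
  intro fr
  induction fr with
  | nil => intro l p a; simp [pvBatchA]
  | cons u fr ih =>
      intro l p a
      simp only [pvBatchA, List.foldl_cons]
      have h1 : pvUnv adj (pvInnerA adj (l, p, a) u).1 + (pvInnerA adj (l, p, a) u).2.2.length ≤
          pvUnv adj l + a.length :=
        pvInnerA_bound adj u _ l p a (fun v hv => pvMem_getD_adj adj u v hv)
      have h2 := ih (pvInnerA adj (l, p, a) u).1 (pvInnerA adj (l, p, a) u).2.1
        (pvInnerA adj (l, p, a) u).2.2
      simp only [pvBatchA, Prod.mk.eta] at h2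
      omega

-- A's 'while frontier:' loop (the 'frontier = _next' inside the inner for-loop does not affect
-- the iteration over the old frontier object; it amounts to frontier := _next after the round)
def pvLoopA (adj : List (Int × List Int)) (level : PySem.Dict Int Int)
    (parent : PySem.Dict Int (Option Int)) (frontier : List Int) : PySem.Dict Int Int :=
  if h : frontier = [] then level
  else
    let st := pvBatchA adj (level, parent, []) frontier
    pvLoopA adj st.1 st.2.1 st.2.2
termination_by pvUnv adj level + frontier.length
decreasing_by
  have hb := pvBatchA_bound adj frontier level parent []
  have hlen : 0 < frontier.length := List.length_pos_iff.mpr h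
  simp only [List.length_nil] at hb
  omega

def bfs (adj : List (Int × List Int)) (s : Int) : List (Int × Int) :=
  (pvLoopA adj (PySem.Dict.ofList [(s, 0)]) (PySem.Dict.ofList [(s, none)]) [s]).items

-- ===== PORT B =====
-- B's per-neighbour step: state = (level, newly discovered vertices appended to the queue)
def pvStepB (u : Int) (st : PySem.Dict Int Int × List Int) (v : Int) :
    PySem.Dict Int Int × List Int :=
  if st.1.contains v then st
  else (st.1.insert v (st.1.getD u 0 + 1), st.2 ++ [v])

-- B's inner loop: for v in adj[u]
def pvInnerB (adj : List (Int × List Int)) (st : PySem.Dict Int Int × List Int) (u : Int) :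
    PySem.Dict Int Int × List Int :=
  ((PySem.Dict.mk adj).getD u []).foldl (pvStepB u) st

lemma pvInnerB_bound (adj : List (Int × List Int)) (u : Int) :
    ∀ (ns : List Int) (l : PySem.Dict Int Int) (a : List Int),
      (∀ v ∈ ns, v ∈ pvU adj) →
      pvUnv adj (ns.foldl (pvStepB u) (l, a)).1 + (ns.foldl (pvStepB u) (l, a)).2.length ≤
        pvUnv adj l + a.length := by
  intro ns
  induction ns with
  | nil => intro l a _; simp
  | cons v ns ih =>
      intro l a hmem
      simp only [List.foldl_cons]
      by_cases hc : l.contains v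
      · simp only [pvStepB, hc, if_pos]
        exact ih l a (fun w hw => hmem w (List.mem_cons_of_mem _ hw))
      · have hfresh := pvUnv_insert_fresh adj l v (l.getD u 0 + 1)
          (hmem v List.mem_cons_self) (by simpa using hc)
        simp only [pvStepB, hc, if_neg, Bool.false_eq_true, not_false_iff]
        have := ih (l.insert v (l.getD u 0 + 1)) (a ++ [v])
          (fun w hw => hmem w (List.mem_cons_of_mem _ hw))
        simp only [List.length_append, List.length_cons, List.length_nil] at this
        omega

-- B's single while-loop over the queue: the Python advances a read cursor i over the growing
-- list `queue`; the unread suffix with new discoveries appended is exactly `rest ++ st.2`.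
def pvLoopB (adj : List (Int × List Int)) (level : PySem.Dict Int Int)
    (queue : List Int) : PySem.Dict Int Int :=
  match queue with
  | [] => level
  | u :: rest =>
      let st := pvInnerB adj (level, []) u
      pvLoopB adj st.1 (rest ++ st.2)
termination_by pvUnv adj level + queue.length
decreasing_by
  have hb := pvInnerB_bound adj u ((PySem.Dict.mk adj).getD u []) level []
    (fun v hv => pvMem_getD_adj adj u v hv)
  simp only [List.length_nil] at hb
  simp only [pvInnerB] at *
  simp only [List.length_append, List.length_cons]
  omega

def bfs_alt (adj : List (Int × List Int)) (s : Int) : List (Int × Int) :=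
  (pvLoopB adj (PySem.Dict.ofList [(s, 0)]) [s]).items

-- ===== PRECONDITION & SPEC =====
-- Python's adj[u] raises KeyError (in A and in B alike) iff some vertex reachable from s is not a
-- key of adj. pvReach saturates the set of vertices reachable from s through keys (adj.length + 1
-- rounds of neighbour expansion reach the fixpoint); Pre_ asks that all of them are keys.
def pvReachStep (adj : List (Int × List Int)) (R : List Int) : List Int :=
  PySem.Set.update R (R.flatMap (fun u => (PySem.Dict.mk adj).getD u []))

def pvReach (adj : List (Int × List Int)) (s : Int) : List Int :=
  (pvReachStep adj)^[adj.length + 1] [s]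

def Pre_bfs (adj : List (Int × List Int)) (s : Int) : Prop :=
  ∀ v ∈ pvReach adj s, v ∈ adj.map Prod.fst
instance (adj : List (Int × List Int)) (s : Int) : Decidable (Pre_bfs adj s) := by
  unfold Pre_bfs; infer_instance

def pvWitness_bfs : (List (Int × List Int)) × Int := ([(0, [1, 2]), (1, [0]), (2, [])], 0)

def Spec_bfs (adj : List (Int × List Int)) (s : Int) (out : List (Int × Int)) : Prop := out = bfs_alt adj s
instance (adj : List (Int × List Int)) (s : Int) (out : List (Int × Int)) : Decidable (Spec_bfs adj s out) := by unfold Spec_bfs; infer_instance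

-- ===== CLAIM (what is proved, stated in full; the proofs are below) =====
def Claim_equal_bfs : Prop := ∀ (adj : List (Int × List Int)) (s : Int), Dom_bfs adj s → Pre_bfs adj s → Spec_bfs adj s (bfs adj s)

-- ===== LEMMAS AND PROOFS =====

-- A's batch state projects onto B's: same level, same list of new discoveries (parent is extra)
lemma pvFoldA_proj (u : Int) :
    ∀ (ns : List Int) (l : PySem.Dict Int Int) (p : PySem.Dict Int (Option Int)) (a : List Int),
      ∃ p', ns.foldl (pvStepA u) (l, p, a) =
        ((ns.foldl (pvStepB u) (l, a)).1, p', (ns.foldl (pvStepB u) (l, a)).2) := by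
  intro ns
  induction ns with
  | nil => intro l p a; exact ⟨p, rfl⟩
  | cons v ns ih =>
      intro l p a
      simp only [List.foldl_cons]
      by_cases hc : l.contains v
      · simpa [pvStepA, pvStepB, hc] using ih l p a
      · simpa [pvStepA, pvStepB, hc] using
          ih (l.insert v (l.getD u 0 + 1)) (p.insert v (some u)) (a ++ [v])

lemma pvBatchA_proj (adj : List (Int × List Int)) :
    ∀ (fr : List Int) (l : PySem.Dict Int Int) (p : PySem.Dict Int (Option Int)) (a : List Int),
      ∃ p', pvBatchA adj (l, p, a) fr =
        ((fr.foldl (pvInnerB adj) (l, a)).1, p', (fr.foldl (pvInnerB adj) (l, a)).2) := by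
  intro fr
  induction fr with
  | nil => intro l p a; exact ⟨p, rfl⟩
  | cons u fr ih =>
      intro l p a
      simp only [pvBatchA, List.foldl_cons] at *
      obtain ⟨p1, h1⟩ := pvFoldA_proj u ((PySem.Dict.mk adj).getD u []) l p a
      simp only [pvInnerA, pvInnerB] at *
      rw [h1]
      exact ih _ p1 _

-- fold of pvStepB only appends to the accumulator
lemma pvFoldB_acc (u : Int) :
    ∀ (ns : List Int) (l : PySem.Dict Int Int) (a : List Int),
      ns.foldl (pvStepB u) (l, a) =
        ((ns.foldl (pvStepB u) (l, [])).1, a ++ (ns.foldl (pvStepB u) (l, [])).2) := by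
  intro ns
  induction ns with
  | nil => intro l a; simp
  | cons v ns ih =>
      intro l a
      simp only [List.foldl_cons]
      by_cases hc : l.contains v
      · simp only [pvStepB, hc, if_pos]
        exact ih l a
      · simp only [pvStepB, hc, if_neg, Bool.false_eq_true, not_false_iff]
        rw [ih (l.insert v (l.getD u 0 + 1)) (a ++ [v]),
            ih (l.insert v (l.getD u 0 + 1)) ([] ++ [v])]
        simp

lemma pvBatchB_acc (adj : List (Int × List Int)) :
    ∀ (fr : List Int) (l : PySem.Dict Int Int) (a : List Int),
      fr.foldl (pvInnerB adj) (l, a) =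
        ((fr.foldl (pvInnerB adj) (l, [])).1, a ++ (fr.foldl (pvInnerB adj) (l, [])).2) := by
  intro fr
  induction fr with
  | nil => intro l a; simp
  | cons u fr ih =>
      intro l a
      simp only [List.foldl_cons, pvInnerB]
      rw [pvFoldB_acc u _ l a, pvFoldB_acc u _ l []]
      simp only [List.nil_append]
      rw [ih ((((PySem.Dict.mk adj).getD u []).foldl (pvStepB u) (l, [])).1)
            (a ++ (((PySem.Dict.mk adj).getD u []).foldl (pvStepB u) (l, [])).2),
          ih ((((PySem.Dict.mk adj).getD u []).foldl (pvStepB u) (l, [])).1)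
            ((((PySem.Dict.mk adj).getD u []).foldl (pvStepB u) (l, [])).2)]
      simp [List.append_assoc]

-- processing a batch at the head of B's queue equals one round of A's batch then the rest
lemma pvLoopB_batch (adj : List (Int × List Int)) :
    ∀ (fr : List Int) (l : PySem.Dict Int Int) (q2 : List Int),
      pvLoopB adj l (fr ++ q2) =
        pvLoopB adj (fr.foldl (pvInnerB adj) (l, [])).1
          (q2 ++ (fr.foldl (pvInnerB adj) (l, [])).2) := by
  intro fr
  induction fr with
  | nil => intro l q2; simp
  | cons u fr ih =>
      intro l q2
      have hstep : pvLoopB adj l (u :: (fr ++ q2)) =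
          pvLoopB adj (pvInnerB adj (l, []) u).1 ((fr ++ q2) ++ (pvInnerB adj (l, []) u).2) := by
        rw [pvLoopB]
      rw [List.cons_append, hstep, List.append_assoc,
          ih (pvInnerB adj (l, []) u).1 (q2 ++ (pvInnerB adj (l, []) u).2)]
      have hb : (u :: fr).foldl (pvInnerB adj) (l, []) =
          ((fr.foldl (pvInnerB adj) ((pvInnerB adj (l, []) u).1, [])).1,
            (pvInnerB adj (l, []) u).2 ++
              (fr.foldl (pvInnerB adj) ((pvInnerB adj (l, []) u).1, [])).2) := by
        simp only [List.foldl_cons]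
        have := pvBatchB_acc adj fr (pvInnerB adj (l, []) u).1 (pvInnerB adj (l, []) u).2
        rw [show pvInnerB adj (l, []) u =
              ((pvInnerB adj (l, []) u).1, (pvInnerB adj (l, []) u).2) from rfl] at this ⊢
        exact this
      rw [hb]
      simp [List.append_assoc]

-- main correspondence: A's level-synchronous loop equals B's FIFO loop from any common state
lemma pvLoopA_eq_loopB (adj : List (Int × List Int)) :
    ∀ (n : Nat) (l : PySem.Dict Int Int) (p : PySem.Dict Int (Option Int)) (fr : List Int),
      pvUnv adj l + fr.length ≤ n → pvLoopA adj l p fr = pvLoopB adj l fr := by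
  intro n
  induction n with
  | zero =>
      intro l p fr h
      have : fr = [] := by
        have := List.length_eq_zero_iff.mp (by omega : fr.length = 0); exact this
      subst this
      rw [pvLoopA, pvLoopB]; simp
  | succ n ih =>
      intro l p fr h
      rcases fr with _ | ⟨u, rest⟩
      · rw [pvLoopA, pvLoopB]; simp
      · have hfr : (u :: rest) ≠ [] := by simp
        rw [pvLoopA]
        simp only [hfr, dif_neg, not_false_iff]
        obtain ⟨p', hproj⟩ := pvBatchA_proj adj (u :: rest) l p []
        rw [hproj]
        have hloopB : pvLoopB adj l (u :: rest) =
            pvLoopB adj ((u :: rest).foldl (pvInnerB adj) (l, [])).1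
              ((u :: rest).foldl (pvInnerB adj) (l, [])).2 := by
          have := pvLoopB_batch adj (u :: rest) l []
          simpa using this
        rw [hloopB]
        apply ih
        -- the measure decreased: batch preserves the bound and the frontier was nonempty
        have hb := pvBatchA_bound adj (u :: rest) l p []
        rw [hproj] at hb
        simp only [List.length_nil, List.length_cons] at hb h ⊢
        omega

-- ===== VERDICT (by name: the statement is the Claim_ definition above) =====
theorem bfs_spec : Claim_equal_bfs := by
  intro adj s _ _
  unfold Spec_bfs bfs bfs_alt
  rw [pvLoopA_eq_loopB adj (pvUnv adj (PySem.Dict.ofList [(s, 0)]) + 1)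
    (PySem.Dict.ofList [(s, 0)]) (PySem.Dict.ofList [(s, none)]) [s] (by simp)]
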